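-- pv_equiv track=rewrite | github.com/WilliamKesuma/AWS-Gadget-Management-System | backend/services/lambdas/functions/NotificationProcessor/lambda_function.py | _get_entity_prefix
-- ===== SOURCE A (Python) =====
-- def _get_entity_prefix(sk: str) -> str:
--     """Determine the entity type from the SK value.
--
--     Returns the SK prefix used to match notification rules:
--     - 'METADATA' for asset metadata records
--     - 'ISSUE#', 'SOFTWARE#', 'HANDOVER#', 'DISPOSAL#', 'RETURN#', 'AUDIT#' for sub-records
--     """
--     if sk == "METADATA":
--         return "METADATA"
--     for prefix in (
--         "ISSUE#",
--         "SOFTWARE#",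
--         "HANDOVER#",
--         "DISPOSAL#",
--         "RETURN#",
--         "AUDIT#",
--     ):
--         if sk.startswith(prefix):
--             return prefix
--     return sk.split("#")[0] + "#" if "#" in sk else sk
-- ===== SOURCE B (Python) =====
-- def _get_entity_prefix(sk: str) -> str:
--     """Everything up to and including the first '#' (sk unchanged if no '#')."""
--     head, sep, _ = sk.partition("#")
--     return head + sep
-- ===== Notes on version B (the rewrite author's own statement) =====
-- stated objective: simpler
-- what changed: Replaced the METADATA special case, the six-prefix startswith scan and the split-based fallback by a single str.partition('#') returning everything up to and including the first '#': each listed prefix ends in exactly one '#', so the closed-form decomposition yields the same value on every input.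
import Mathlib
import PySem

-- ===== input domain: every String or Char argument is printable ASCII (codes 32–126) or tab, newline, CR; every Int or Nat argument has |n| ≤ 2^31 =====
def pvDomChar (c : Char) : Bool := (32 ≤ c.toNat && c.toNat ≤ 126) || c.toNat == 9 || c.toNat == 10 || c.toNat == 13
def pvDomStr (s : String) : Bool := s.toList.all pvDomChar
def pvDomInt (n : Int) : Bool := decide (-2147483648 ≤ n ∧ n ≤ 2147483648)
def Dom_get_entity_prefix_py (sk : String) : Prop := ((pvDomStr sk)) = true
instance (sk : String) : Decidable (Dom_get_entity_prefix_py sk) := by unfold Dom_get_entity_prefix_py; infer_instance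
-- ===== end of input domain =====

-- B replaces A's METADATA special case, six-prefix startswith scan and split fallback by one
-- str.partition('#') decomposition (simpler); proved equal on all domain inputs.


-- ===== PORT A =====
-- the for-loop with early return, then A's final line; sk.split("#") is PySem.Chars.splitOn
-- (exact: the separator "#" is non-empty, so split never raises and never returns an empty list,
-- so the Python index [0] is total = headD); '+ "#"' is list append under String.ofList.
def pvALoop (sk : String) : List String → String
  | p :: rest => if PySem.Str.startswith sk p then p else pvALoop sk rest
  | [] =>
      if PySem.Str.isIn "#" sk then
        String.ofList ((PySem.Chars.splitOn sk.toList ['#']).headD [] ++ ['#'])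
      else sk

def get_entity_prefix_py (sk : String) : String :=
  if sk = "METADATA" then "METADATA"
  else pvALoop sk ["ISSUE#", "SOFTWARE#", "HANDOVER#", "DISPOSAL#", "RETURN#", "AUDIT#"]

-- ===== PORT B =====
-- hand port of str.partition('#') (PySem has no partition; exact): the head part is the
-- characters before the first '#'; the separator was found iff the head is shorter than sk;
-- return head + sep.
def get_entity_prefix_py_alt (sk : String) : String :=
  if (sk.toList.takeWhile (fun c => c != '#')).length = sk.toList.length then sk
  else String.ofList (sk.toList.takeWhile (fun c => c != '#') ++ ['#'])

-- ===== PRECONDITION & SPEC =====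
def Spec_get_entity_prefix_py (sk : String) (out : String) : Prop := out = get_entity_prefix_py_alt sk
instance (sk : String) (out : String) : Decidable (Spec_get_entity_prefix_py sk out) := by unfold Spec_get_entity_prefix_py; infer_instance

-- ===== CLAIM (what is proved, stated in full; the proofs are below) =====
def Claim_equal_get_entity_prefix_py : Prop := ∀ (sk : String), Dom_get_entity_prefix_py sk → Spec_get_entity_prefix_py sk (get_entity_prefix_py sk)

-- ===== LEMMAS AND PROOFS =====

lemma pv_takeWhile_no_hash (q t : List Char) (hq : '#' ∉ q) :
    (q ++ '#' :: t).takeWhile (fun c => c != '#') = q := by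
  induction q with
  | nil => simp
  | cons c cs ih =>
    simp only [List.mem_cons, not_or] at hq
    simp [hq.1, ih hq.2, bne_iff_ne, Ne.symm]

-- B's value on a string whose first '#' splits it as q ++ '#' :: t
lemma pv_alt_of_split (sk : String) (q t : List Char) (hq : '#' ∉ q)
    (h : sk.toList = q ++ '#' :: t) :
    get_entity_prefix_py_alt sk = String.ofList (q ++ ['#']) := by
  unfold get_entity_prefix_py_alt
  rw [h, pv_takeWhile_no_hash q t hq]
  have hlen : ¬ q.length = (q ++ '#' :: t).length := by intro hc; simp at hc
  simp only [hlen, if_false]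

lemma pv_alt_of_hit (sk : String) (q : List Char) (hq : '#' ∉ q)
    (hp : (q ++ ['#']) <+: sk.toList) :
    get_entity_prefix_py_alt sk = String.ofList (q ++ ['#']) := by
  obtain ⟨t, ht⟩ := hp
  exact pv_alt_of_split sk q t hq (by rw [← ht]; simp)

-- the accumulator of splitOn.go only contributes a reversed prefix
lemma pv_go_acc (sep : List Char) (fuel : Nat) :
    ∀ (l cur : List Char) (acc : List (List Char)),
      PySem.Chars.splitOn.go sep fuel l cur acc =
        acc.reverse ++ PySem.Chars.splitOn.go sep fuel l cur [] := by
  induction fuel with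
  | zero =>
    intro l cur acc
    rw [PySem.Chars.splitOn.go, PySem.Chars.splitOn.go]
    cases l <;> simp
  | succ f ih =>
    intro l cur acc
    cases l with
    | nil =>
      rw [PySem.Chars.splitOn.go, PySem.Chars.splitOn.go] <;> simp
    | cons c rest =>
      rw [PySem.Chars.splitOn.go, PySem.Chars.splitOn.go]
      by_cases hp : sep.isPrefixOf (c :: rest)
      · simp only [hp, if_true]
        rw [ih _ [] (cur.reverse :: acc), ih _ [] [cur.reverse]]
        simp
      · simp only [hp]
        rw [ih rest (c :: cur) acc]
        simp

-- running splitOn.go over the hash-free block q up to the first '#'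
lemma pv_go_run (q : List Char) (hq : '#' ∉ q) :
    ∀ (fuel : Nat) (t cur : List Char), q.length < fuel →
      PySem.Chars.splitOn.go ['#'] fuel (q ++ '#' :: t) cur [] =
        (cur.reverse ++ q) :: PySem.Chars.splitOn.go ['#'] (fuel - (q.length + 1)) t [] [] := by
  induction q with
  | nil =>
    intro fuel t cur hf
    obtain ⟨f, rfl⟩ : ∃ f, fuel = f + 1 := ⟨fuel - 1, by omega⟩
    simp only [List.nil_append]
    rw [PySem.Chars.splitOn.go]
    simp only [List.isPrefixOf, beq_self_eq_true, Bool.true_and, if_true]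
    rw [pv_go_acc]
    simp
  | cons c q' ih =>
    intro fuel t cur hf
    obtain ⟨f, rfl⟩ : ∃ f, fuel = f + 1 := ⟨fuel - 1, by omega⟩
    simp only [List.mem_cons, not_or] at hq
    simp only [List.cons_append]
    rw [PySem.Chars.splitOn.go]
    have hnp : ¬ (['#'].isPrefixOf (c :: (q' ++ '#' :: t))) := by
      simp [List.isPrefixOf]; exact hq.1
    simp only [hnp]
    have hf' : q'.length < f := by simp at hf; omega
    rw [ih hq.2 f t (c :: cur) hf']
    simp

lemma pv_splitOn_head (q t : List Char) (hq : '#' ∉ q) :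
    (PySem.Chars.splitOn (q ++ '#' :: t) ['#']).headD [] = q := by
  unfold PySem.Chars.splitOn
  rw [pv_go_run q hq _ t [] (by simp)]
  simp

lemma pv_mem_iff_isIn (sk : String) : PySem.Str.isIn "#" sk = true ↔ '#' ∈ sk.toList := by
  rw [PySem.Str.isIn_iff_infix]
  simpa using List.singleton_infix_iff '#' sk.toList

-- ===== VERDICT (by name: the statement is the Claim_ definition above) =====
theorem get_entity_prefix_py_spec : Claim_equal_get_entity_prefix_py := by
  intro sk _
  unfold Spec_get_entity_prefix_py get_entity_prefix_py
  by_cases hm : sk = "METADATA"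
  · subst hm; decide
  simp only [hm, if_false, pvALoop]
  by_cases h1 : PySem.Str.startswith sk "ISSUE#" <;>
    simp only [h1, Bool.false_eq_true, if_true, if_false]
  · rw [pv_alt_of_hit sk ['I','S','S','U','E'] (by decide)
      (by simpa using (PySem.Chars.startswith_iff _ _).mp (by simpa using h1))]
    decide
  by_cases h2 : PySem.Str.startswith sk "SOFTWARE#" <;>
    simp only [h2, Bool.false_eq_true, if_true, if_false]
  · rw [pv_alt_of_hit sk ['S','O','F','T','W','A','R','E'] (by decide)
      (by simpa using (PySem.Chars.startswith_iff _ _).mp (by simpa using h2))]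
    decide
  by_cases h3 : PySem.Str.startswith sk "HANDOVER#" <;>
    simp only [h3, Bool.false_eq_true, if_true, if_false]
  · rw [pv_alt_of_hit sk ['H','A','N','D','O','V','E','R'] (by decide)
      (by simpa using (PySem.Chars.startswith_iff _ _).mp (by simpa using h3))]
    decide
  by_cases h4 : PySem.Str.startswith sk "DISPOSAL#" <;>
    simp only [h4, Bool.false_eq_true, if_true, if_false]
  · rw [pv_alt_of_hit sk ['D','I','S','P','O','S','A','L'] (by decide)
      (by simpa using (PySem.Chars.startswith_iff _ _).mp (by simpa using h4))]
    decide
  by_cases h5 : PySem.Str.startswith sk "RETURN#" <;>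
    simp only [h5, Bool.false_eq_true, if_true, if_false]
  · rw [pv_alt_of_hit sk ['R','E','T','U','R','N'] (by decide)
      (by simpa using (PySem.Chars.startswith_iff _ _).mp (by simpa using h5))]
    decide
  by_cases h6 : PySem.Str.startswith sk "AUDIT#" <;>
    simp only [h6, Bool.false_eq_true, if_true, if_false]
  · rw [pv_alt_of_hit sk ['A','U','D','I','T'] (by decide)
      (by simpa using (PySem.Chars.startswith_iff _ _).mp (by simpa using h6))]
    decide
  by_cases hin : '#' ∈ sk.toList
  · have hi : PySem.Str.isIn "#" sk = true := (pv_mem_iff_isIn sk).mpr hin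
    simp only [hi, if_true]
    set q := sk.toList.takeWhile (fun c => c != '#') with hqdef
    have hq : '#' ∉ q := by
      intro hmem
      have := List.mem_takeWhile_imp hmem
      simp at this
    have hsplit : sk.toList = q ++ '#' :: (sk.toList.dropWhile (fun c => c != '#')).tail := by
      conv_lhs => rw [← List.takeWhile_append_dropWhile (p := fun c => c != '#') (l := sk.toList)]
      congr 1
      have hne : sk.toList.dropWhile (fun c => c != '#') ≠ [] := by
        intro hnil
        have htd := List.takeWhile_append_dropWhile (p := fun c => c != '#') (l := sk.toList)
        rw [hnil, List.append_nil] at htd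
        rw [← htd] at hin
        exact hq (hqdef ▸ hin)
      have hhead : ((sk.toList.dropWhile (fun c => c != '#')).head hne != '#') = false :=
        List.head_dropWhile_not (p := fun c => c != '#') hne
      have hh : (sk.toList.dropWhile (fun c => c != '#')).head hne = '#' := by
        simpa using hhead
      conv_lhs => rw [← List.cons_head_tail hne]
      rw [hh]
    rw [pv_alt_of_split sk q _ hq hsplit]
    congr 2
    rw [hsplit, pv_splitOn_head q _ hq]
  · have hi : PySem.Str.isIn "#" sk = false :=
      Bool.eq_false_iff.mpr (fun h => hin ((pv_mem_iff_isIn sk).mp h))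
    simp only [hi, Bool.false_eq_true, if_false]
    unfold get_entity_prefix_py_alt
    have hall : sk.toList.takeWhile (fun c => c != '#') = sk.toList :=
      List.takeWhile_eq_self_iff.mpr (by
        intro a ha
        simp only [bne_iff_ne, ne_eq]
        rintro rfl
        exact hin ha)
    simp [hall]
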